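-- pv_equiv track=rewrite | github.com/ELVIS-Project/vis-framework | controllers/experimenter.py | interval_sorter
-- ===== SOURCE A (Python) =====
-- def interval_sorter(left, right):
--     """
--     Returns -1 if the first argument is a smaller interval.
--     Returns 1 if the second argument is a smaller interval.
--     Returns 0 if both arguments are the same.
--
--     Input should be a str of the following form:
--     - d, m, M, or A
--     - an int
--
--     Examples:
--     >>> from vis import interval_sorter
--     >>> interval_sorter( 'm3', 'm3' )
--     0
--     >>> interval_sorter( 'm3', 'M3' )
--     1
--     >>> interval_sorter( 'A4', 'd4' )
--     -1
--     """
--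
--     string_digits = '0123456789'
--     list_of_directions = ['+', '-']
--
--     # I want to sort based on generic size, so the direction is irrelevant. If
--     # we have directions, they'll be removed with this. If we don't have
--     # directions, this will have no effect.
--     for direct in list_of_directions:
--         left = left.replace(direct, '')
--         right = right.replace(direct, '')
--
--     # If we have numbers with no qualities, we'll just add a 'P' to both, to
--     # pretend they have the same quality (which, as far as we know, they do).
--     if left[0] in string_digits and right[0] in string_digits:
--         left = 'P' + left
--         right = 'P' + right
--
--     # Comparisons!
--     if left == right:
--         post = 0
--     elif int(left[1:]) < int(right[1:]):  # if x is generically smaller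
--         post = -1
--     elif int(left[1:]) > int(right[1:]):  # if y is generically smaller
--         post = 1
--     else:  # otherwise, we're down to the species/quality
--         left_qual = left[0]
--         right_qual = right[0]
--         if left_qual == 'd':
--             post = -1
--         elif right_qual == 'd':
--             post = 1
--         elif left_qual == 'A':
--             post = 1
--         elif right_qual == 'A':
--             post = -1
--         elif left_qual == 'm':
--             post = -1
--         elif right_qual == 'm':
--             post = 1
--         else:
--             post = 0
--
--     return post
-- ===== SOURCE B (Python) =====
-- def interval_sorter(left, right):
--     # Same direction-stripping and conditional 'P'-prepend as the original.
--     for direct in ('+', '-'):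
--         left = left.replace(direct, '')
--         right = right.replace(direct, '')
--     if left[0] in '0123456789' and right[0] in '0123456789':
--         left = 'P' + left
--         right = 'P' + right
--     if left == right:
--         return 0
--
--     # Linearise the ordering into one integer per side: the quality ranks fit in
--     # [0, 4), so 4*size + rank orders exactly like (size, rank).
--     def score(s):
--         return 4 * int(s[1:]) + {'d': 0, 'm': 1, 'A': 3}.get(s[0], 2)
--
--     diff = score(left) - score(right)
--     return (diff > 0) - (diff < 0)
-- ===== Notes on version B (the rewrite author's own statement) =====
-- stated objective: alternative
-- what changed: The staged comparison (three-way size test followed by an eight-branch quality cascade) is replaced by an arithmetic linearisation: each side is reduced to one integer score 4*int(s[1:]) + quality_rank (ranks d=0,m=1,other=2,A=3 fit in [0,4)), and the result is the sign of the score difference.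
-- intended difference: On pairs whose stripped strings are unequal but have the same quality letter in {d,m,A} and numeric parts parsing to the same int (e.g. 'd05' vs 'd5'), A returns -1/+1 in both argument orders (its cascade fires on the shared letter, breaking comparator antisymmetry), while B returns 0, the intended value since the two intervals are equal. — e.g. on interval_sorter("d05", "d5"): A returns -1, B returns 0
import Mathlib
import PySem

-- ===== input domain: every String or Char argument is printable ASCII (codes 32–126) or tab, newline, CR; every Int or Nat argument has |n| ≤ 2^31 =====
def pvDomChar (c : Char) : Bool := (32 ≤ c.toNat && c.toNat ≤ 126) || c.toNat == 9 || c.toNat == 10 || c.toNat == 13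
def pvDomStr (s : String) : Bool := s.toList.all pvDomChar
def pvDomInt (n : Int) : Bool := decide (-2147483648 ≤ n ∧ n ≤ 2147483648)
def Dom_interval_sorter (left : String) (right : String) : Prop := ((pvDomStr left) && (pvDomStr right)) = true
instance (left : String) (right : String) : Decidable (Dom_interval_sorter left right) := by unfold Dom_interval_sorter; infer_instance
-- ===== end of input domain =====

-- B replaces A's staged comparison by one arithmetic score per side; the intended difference on
-- denormalised equal intervals (see D_interval_sorter) is stated and proved below.

-- shared prelude of both Pythons (identical lines in Source A and Source B): strip '+'/'-',
-- then prepend 'P' to both when both start with a digit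
def pvStrip (s : List Char) : List Char :=
  PySem.Chars.replace (PySem.Chars.replace s ['+'] []) ['-'] []

def pvDigits : List Char := "0123456789".toList

-- ===== PORT A =====
-- A's comparison after the stripping, on code-point lists (strings are ported via .toList;
-- the `none` branches are dead inside Pre_: Python raises IndexError/ValueError there)
def intervalSorterCoreA (l r : List Char) : Int :=
  match PySem.List.pyGet? l 0, PySem.List.pyGet? r 0 with
  | some cl, some cr =>
    let p := PySem.Chars.isIn [cl] pvDigits && PySem.Chars.isIn [cr] pvDigits
    let l := if p then 'P' :: l else l
    let r := if p then 'P' :: r else r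
    if l = r then 0
    else
      match PySem.Int.ofChars? (PySem.List.slice l (some 1) none),
            PySem.Int.ofChars? (PySem.List.slice r (some 1) none) with
      | some nl, some nr =>
        if nl < nr then -1
        else if nr < nl then 1
        else
          let lq := PySem.List.pyGetD l 0 ' '
          let rq := PySem.List.pyGetD r 0 ' '
          if lq = 'd' then -1
          else if rq = 'd' then 1
          else if lq = 'A' then 1
          else if rq = 'A' then -1
          else if lq = 'm' then -1
          else if rq = 'm' then 1
          else 0
      | _, _ => 0
  | _, _ => 0

def interval_sorter (left : String) (right : String) : Int :=
  intervalSorterCoreA (pvStrip left.toList) (pvStrip right.toList)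

-- ===== PORT B =====
def pvRank (c : Char) : Int :=
  (PySem.Dict.ofList [('d', (0 : Int)), ('m', 1), ('A', 3)]).getD c 2

-- Source B's score(s) = 4*int(s[1:]) + rank; `none` where int() would raise
def pvScore (s : List Char) : Option Int :=
  (PySem.Int.ofChars? (PySem.List.slice s (some 1) none)).map
    (fun n => 4 * n + pvRank (PySem.List.pyGetD s 0 ' '))

def intervalSorterCoreB (l r : List Char) : Int :=
  match PySem.List.pyGet? l 0, PySem.List.pyGet? r 0 with
  | some cl, some cr =>
    let p := PySem.Chars.isIn [cl] pvDigits && PySem.Chars.isIn [cr] pvDigits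
    let l := if p then 'P' :: l else l
    let r := if p then 'P' :: r else r
    if l = r then 0
    else
      match pvScore l, pvScore r with
      | some sl, some sr =>
        let diff := sl - sr
        (if 0 < diff then 1 else 0) - (if diff < 0 then 1 else 0)
      | _, _ => 0
  | _, _ => 0

def interval_sorter_alt (left : String) (right : String) : Int :=
  intervalSorterCoreB (pvStrip left.toList) (pvStrip right.toList)

-- ===== PRECONDITION & SPEC =====
-- the prepend condition and the processed strings, shared by Pre_ and D_
def pvPrep (l r : List Char) : List Char × List Char :=
  let p := (PySem.List.pyGet? l 0).any (fun c => PySem.Chars.isIn [c] pvDigits) &&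
           (PySem.List.pyGet? r 0).any (fun c => PySem.Chars.isIn [c] pvDigits)
  (if p then 'P' :: l else l, if p then 'P' :: r else r)

-- Pre_ excludes exactly the inputs where Python A raises: an empty string after stripping the
-- direction signs (IndexError / int('') ValueError) and, when the processed strings differ,
-- tails that int() cannot parse (ValueError)
def Pre_interval_sorter (left : String) (right : String) : Prop :=
  pvStrip left.toList ≠ [] ∧ pvStrip right.toList ≠ [] ∧
  (let (l, r) := pvPrep (pvStrip left.toList) (pvStrip right.toList)
   l = r ∨
   (PySem.Int.ofChars? (PySem.List.slice l (some 1) none) ≠ none ∧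
    PySem.Int.ofChars? (PySem.List.slice r (some 1) none) ≠ none))

instance (left : String) (right : String) : Decidable (Pre_interval_sorter left right) := by
  unfold Pre_interval_sorter; infer_instance

def pvWitness_interval_sorter : String × String := ("m3", "M3")

-- On pairs whose stripped strings are unequal but have the same quality letter in {d,m,A} and numeric
-- parts parsing to the same int (e.g. 'd05' vs 'd5'), A returns -1/+1 in both argument orders (its
-- cascade fires on the shared letter, breaking comparator antisymmetry), while B returns 0, the
-- intended value since the two intervals are equal.
def D_interval_sorter (left : String) (right : String) : Prop :=
  let l := left.toList.filter (fun c => !(c == '+') && !(c == '-'))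
  let r := right.toList.filter (fun c => !(c == '+') && !(c == '-'))
  l ≠ r ∧
  l.headD ' ' = r.headD ' ' ∧
  l.headD ' ' ∈ ['d', 'm', 'A'] ∧
  PySem.Int.ofChars? l.tail ≠ none ∧
  PySem.Int.ofChars? l.tail = PySem.Int.ofChars? r.tail

instance (left : String) (right : String) : Decidable (D_interval_sorter left right) := by
  unfold D_interval_sorter; infer_instance

def Spec_interval_sorter (left : String) (right : String) (out : Int) : Prop :=
  ¬ D_interval_sorter left right → out = interval_sorter_alt left right
instance (left : String) (right : String) (out : Int) : Decidable (Spec_interval_sorter left right out) := by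
  unfold Spec_interval_sorter; infer_instance

def pvDiffWitness_interval_sorter : String × String := ("d05", "d5")
def pvDiffWitnessOut_interval_sorter : Int × Int := (-1, 0)

-- ===== CLAIM (what is proved, stated in full; the proofs are below) =====
def Claim_unchanged_interval_sorter : Prop := ∀ (left : String) (right : String), Dom_interval_sorter left right → Pre_interval_sorter left right → Spec_interval_sorter left right (interval_sorter left right)
def Claim_changed_interval_sorter : Prop := Dom_interval_sorter (pvDiffWitness_interval_sorter.1) (pvDiffWitness_interval_sorter.2) ∧ Pre_interval_sorter (pvDiffWitness_interval_sorter.1) (pvDiffWitness_interval_sorter.2) ∧ D_interval_sorter (pvDiffWitness_interval_sorter.1) (pvDiffWitness_interval_sorter.2) ∧ interval_sorter (pvDiffWitness_interval_sorter.1) (pvDiffWitness_interval_sorter.2) = pvDiffWitnessOut_interval_sorter.1 ∧ interval_sorter_alt (pvDiffWitness_interval_sorter.1) (pvDiffWitness_interval_sorter.2) = pvDiffWitnessOut_interval_sorter.2 ∧ pvDiffWitnessOut_interval_sorter.1 ≠ pvDiffWitnessOut_interval_sorter.2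
def Claim_exact_interval_sorter : Prop := ∀ (left : String) (right : String), Dom_interval_sorter left right → Pre_interval_sorter left right → D_interval_sorter left right → interval_sorter left right ≠ interval_sorter_alt left right

-- ===== LEMMAS AND PROOFS =====

lemma rank_eval (c : Char) :
    pvRank c = if c = 'd' then 0 else if c = 'm' then 1 else if c = 'A' then 3 else 2 := by
  by_cases h1 : c = 'd' <;> by_cases h2 : c = 'm' <;> by_cases h3 : c = 'A' <;>
    first
    | (subst_vars; decide)
    | (simp only [pvRank, PySem.Dict.getD, PySem.Dict.ofList, PySem.Dict.get?,
        PySem.Dict.update, PySem.Dict.insert, PySem.Dict.empty, PySem.Dict.contains]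
       simp [List.find?, show ('d' == c) = false from by simp [Ne.symm h1],
         show ('m' == c) = false from by simp [Ne.symm h2],
         show ('A' == c) = false from by simp [Ne.symm h3], h1, h2, h3])

lemma rank_bounds (c : Char) : 0 ≤ pvRank c ∧ pvRank c ≤ 3 := by
  rw [rank_eval]; split_ifs <;> omega

-- Python's str.replace(c, '') removes every occurrence of c, i.e. filters it out
lemma replace_go_single (c : Char) (fuel : Nat) :
    ∀ (l acc : List Char), l.length ≤ fuel →
      PySem.Chars.replace.go [c] [] fuel l acc = acc.reverse ++ l.filter (fun x => !(x == c)) := by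
  induction fuel with
  | zero =>
    intro l acc h
    have : l = [] := List.length_eq_zero_iff.mp (Nat.le_zero.mp h)
    subst this
    simp [PySem.Chars.replace.go]
  | succ n ih =>
    intro l acc h
    cases l with
    | nil => simp [PySem.Chars.replace.go]
    | cons c' t =>
      simp only [PySem.Chars.replace.go]
      by_cases hc : c = c'
      · subst hc
        have hpre : List.isPrefixOf [c] (c :: t) = true := by
          simp [List.isPrefixOf]
        rw [if_pos hpre]
        simp only [List.length_cons] at h
        rw [ih _ _ (by simpa using Nat.le_of_succ_le_succ h)]
        simp
      · have hpre : List.isPrefixOf [c] (c' :: t) = true → False := by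
          simp [List.isPrefixOf]; intro hcc; exact hc hcc
        rw [if_neg hpre]
        simp only [List.length_cons] at h
        rw [ih _ _ (Nat.le_of_succ_le_succ h)]
        simp [Ne.symm hc]

lemma replace_single_eq_filter (s : List Char) (c : Char) :
    PySem.Chars.replace s [c] [] = s.filter (fun x => !(x == c)) := by
  rw [PySem.Chars.replace]
  simp only [List.isEmpty_cons, if_false, Bool.false_eq_true]
  simpa using replace_go_single c s.length s [] le_rfl

lemma strip_eq_filter (s : List Char) :
    pvStrip s = s.filter (fun c => !(c == '+') && !(c == '-')) := by
  rw [pvStrip, replace_single_eq_filter, replace_single_eq_filter, List.filter_filter]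
  exact List.filter_congr (fun c _ => Bool.and_comm _ _)

-- A's quality cascade computes the sign of the rank difference, whenever the two
-- qualities are not the same letter of {d, m, A}
lemma cascade_eq_rank (lq rq : Char)
    (h : ¬ (lq = rq ∧ lq ∈ ['d', 'm', 'A'])) :
    (if lq = 'd' then (-1 : Int)
     else if rq = 'd' then 1
     else if lq = 'A' then 1
     else if rq = 'A' then -1
     else if lq = 'm' then -1
     else if rq = 'm' then 1
     else 0)
    = (if 0 < pvRank lq - pvRank rq then 1 else 0)
      - (if pvRank lq - pvRank rq < 0 then 1 else 0) := by
  have hl := rank_eval lq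
  have hr := rank_eval rq
  simp only [List.mem_cons, not_and, not_or] at h
  by_cases e1 : lq = 'd' <;> by_cases e2 : rq = 'd' <;>
    by_cases e3 : lq = 'A' <;> by_cases e4 : rq = 'A' <;>
      by_cases e5 : lq = 'm' <;> by_cases e6 : rq = 'm' <;>
        simp_all <;> omega

-- the core programs agree whenever the change condition (stated on the stripped lists) fails
theorem core_eq (l r : List Char)
    (hD : ¬ (l ≠ r ∧ l.headD ' ' = r.headD ' ' ∧ l.headD ' ' ∈ ['d', 'm', 'A'] ∧
             PySem.Int.ofChars? l.tail ≠ none ∧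
             PySem.Int.ofChars? l.tail = PySem.Int.ofChars? r.tail)) :
    intervalSorterCoreA l r = intervalSorterCoreB l r := by
  cases l with
  | nil =>
    cases r <;> simp [intervalSorterCoreA, intervalSorterCoreB, PySem.List.pyGet?_zero]
  | cons cl ls =>
    cases r with
    | nil => simp [intervalSorterCoreA, intervalSorterCoreB, PySem.List.pyGet?_zero]
    | cons cr rs =>
      simp only [intervalSorterCoreA, intervalSorterCoreB, PySem.List.pyGet?_zero_cons]
      cases hp : (PySem.Chars.isIn [cl] pvDigits && PySem.Chars.isIn [cr] pvDigits) <;>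
        simp only [hp, if_true, if_false, Bool.false_eq_true]
      case false =>
        by_cases heq : cl :: ls = cr :: rs
        · simp [heq]
        · simp only [heq, if_false, ite_false, pvScore]
          cases hl : PySem.Int.ofChars? (PySem.List.slice (cl :: ls) (some 1) none) with
          | none => rfl
          | some nl =>
            cases hr : PySem.Int.ofChars? (PySem.List.slice (cr :: rs) (some 1) none) with
            | none => rfl
            | some nr =>
              simp only [Option.map_some, PySem.List.pyGetD_zero_cons]
              obtain ⟨hl0, hl3⟩ := rank_bounds cl
              obtain ⟨hr0, hr3⟩ := rank_bounds cr
              rcases lt_trichotomy nl nr with h | h | h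
              · simp only [h, if_true]
                split_ifs <;> omega
              · subst h
                simp only [lt_irrefl, if_false]
                have hc : ¬ (cl = cr ∧ cl ∈ ['d', 'm', 'A']) := by
                  rintro ⟨hq, hmem⟩
                  refine hD ⟨heq, by simp [hq], by simpa using hmem, ?_, ?_⟩
                  · rw [← PySem.List.slice_from_one (cl :: ls)]
                    simp [hl]
                  · rw [show (cl :: ls).tail = PySem.List.slice (cl :: ls) (some 1) none from
                          (PySem.List.slice_from_one _).symm,
                        show (cr :: rs).tail = PySem.List.slice (cr :: rs) (some 1) none from
                          (PySem.List.slice_from_one _).symm, hl, hr]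
                rw [cascade_eq_rank cl cr hc]
                split_ifs <;> omega
              · simp only [if_neg (not_lt.mpr (le_of_lt h)), h, if_true]
                split_ifs <;> omega
      case true =>
        by_cases heq : ('P' :: cl :: ls) = ('P' :: cr :: rs)
        · simp [heq]
        · simp only [heq, if_false, ite_false, pvScore]
          cases hl : PySem.Int.ofChars? (PySem.List.slice ('P' :: cl :: ls) (some 1) none) with
          | none => rfl
          | some nl =>
            cases hr : PySem.Int.ofChars? (PySem.List.slice ('P' :: cr :: rs) (some 1) none) with
            | none => rfl
            | some nr =>
              simp only [Option.map_some, PySem.List.pyGetD_zero_cons]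
              obtain ⟨hb0, hb3⟩ := rank_bounds 'P'
              rcases lt_trichotomy nl nr with h | h | h
              · simp only [h, if_true]
                split_ifs <;> omega
              · subst h
                simp only [lt_irrefl, if_false]
                rw [cascade_eq_rank 'P' 'P' (by decide)]
                split_ifs <;> omega
              · simp only [if_neg (not_lt.mpr (le_of_lt h)), h, if_true]
                split_ifs <;> omega

-- inside the change region A's cascade yields ±1 while B's equal scores yield 0
theorem core_ne (l r : List Char)
    (hD : l ≠ r ∧ l.headD ' ' = r.headD ' ' ∧ l.headD ' ' ∈ ['d', 'm', 'A'] ∧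
          PySem.Int.ofChars? l.tail ≠ none ∧
          PySem.Int.ofChars? l.tail = PySem.Int.ofChars? r.tail) :
    intervalSorterCoreA l r ≠ intervalSorterCoreB l r := by
  obtain ⟨hne, hq, hmem, hsome, heqp⟩ := hD
  cases l with
  | nil => simp at hmem
  | cons cl ls =>
    cases r with
    | nil =>
      exact absurd (heqp.trans (by decide)) hsome
    | cons cr rs =>
      simp only [List.headD_cons] at hq hmem
      subst hq
      simp only [List.tail_cons] at hsome heqp
      simp only [intervalSorterCoreA, intervalSorterCoreB, PySem.List.pyGet?_zero_cons]
      cases hp : (PySem.Chars.isIn [cl] pvDigits && PySem.Chars.isIn [cl] pvDigits) <;>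
        simp only [hp, if_true, if_false, Bool.false_eq_true]
      case true =>
        rw [Bool.and_self] at hp
        rcases (show cl = 'd' ∨ cl = 'm' ∨ cl = 'A' by simpa using hmem) with h | h | h <;>
          subst h <;> exact absurd hp (by decide)
      case false =>
        obtain ⟨nl, hl'⟩ := Option.ne_none_iff_exists'.mp hsome
        have hl : PySem.Int.ofChars? (PySem.List.slice (cl :: ls) (some 1) none) = some nl := by
          rw [PySem.List.slice_from_one]; exact hl'
        have hr : PySem.Int.ofChars? (PySem.List.slice (cl :: rs) (some 1) none) = some nl := by
          rw [PySem.List.slice_from_one]; exact heqp.symm.trans hl'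
        simp only [hne, if_false, ite_false, pvScore, hl, hr, Option.map_some, lt_irrefl,
          PySem.List.pyGetD_zero_cons, sub_self]
        rcases (show cl = 'd' ∨ cl = 'm' ∨ cl = 'A' by simpa using hmem) with h | h | h <;>
          subst h <;> simp

-- ===== VERDICT (by name: the statement is the Claim_ definition above) =====
theorem interval_sorter_spec : Claim_unchanged_interval_sorter := by
  intro left right _ _ hD
  refine core_eq _ _ ?_
  rw [strip_eq_filter, strip_eq_filter]
  exact hD

theorem interval_sorter_changed : Claim_changed_interval_sorter := by
  unfold Claim_changed_interval_sorter; decide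

theorem interval_sorter_tight : Claim_exact_interval_sorter := by
  intro left right _ _ hD
  refine core_ne _ _ ?_
  rw [strip_eq_filter, strip_eq_filter]
  exact hD
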